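-- pv_equiv track=rewrite | github.com/toniegorov/darts-team-manager | darts_team_manager.py | dense_rank
-- ===== SOURCE A (Python) =====
-- def dense_rank(mapping: dict, reverse=True):
--     if not mapping:
--         return {}
--     items = sorted(mapping.items(), key=lambda x: x[1], reverse=reverse)
--     ranks = {}
--     rank = 1
--     for i, (k, v) in enumerate(items):
--         if i > 0 and v != items[i - 1][1]:
--             rank = i + 1
--         ranks[k] = rank
--     return ranks
-- ===== SOURCE B (Python) =====
-- def dense_rank(mapping: dict, reverse=True):
--     if not mapping:
--         return {}
--     groups = {}
--     for k, v in mapping.items():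
--         groups.setdefault(v, []).append(k)
--     ranks = {}
--     total = 0
--     for v in sorted(groups, reverse=reverse):
--         for k in groups[v]:
--             ranks[k] = total + 1
--         total += len(groups[v])
--     return ranks
-- ===== Notes on version B (the rewrite author's own statement) =====
-- stated objective: alternative
-- what changed: Instead of sorting all items and scanning with an index/previous-value comparison, B builds a value->keys grouping dict in one pass, sorts only the distinct values, and assigns each group rank = (#keys already ranked)+1 with a running total.
import Mathlib
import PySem

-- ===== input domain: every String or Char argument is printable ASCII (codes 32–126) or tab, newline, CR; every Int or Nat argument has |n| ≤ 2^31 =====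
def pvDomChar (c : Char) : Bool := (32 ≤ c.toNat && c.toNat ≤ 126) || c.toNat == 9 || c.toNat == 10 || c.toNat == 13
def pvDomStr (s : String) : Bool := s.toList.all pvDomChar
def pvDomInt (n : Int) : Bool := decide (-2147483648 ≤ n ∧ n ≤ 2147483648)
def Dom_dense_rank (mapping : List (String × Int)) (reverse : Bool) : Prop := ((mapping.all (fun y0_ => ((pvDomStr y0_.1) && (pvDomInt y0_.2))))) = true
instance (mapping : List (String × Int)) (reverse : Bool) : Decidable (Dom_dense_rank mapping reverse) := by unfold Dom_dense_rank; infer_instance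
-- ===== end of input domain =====

-- B replaces A's sort-all-items-then-scan-with-previous-value by a value->keys grouping dict,
-- a sort of the distinct values only, and a running total of keys already ranked (objective: alternative).

-- ===== PORT A =====
def dense_rank (mapping : List (String × Int)) (reverse : Bool) : List (String × Int) :=
  if mapping = [] then []
  else
    let items := PySem.List.sorted mapping (fun x => x.2) reverse
    (((PySem.List.enumerate items 0).foldl
        (fun (st : PySem.Dict String Int × Int) ikv =>
          let rank := if ikv.1 > 0 ∧ ikv.2.2 ≠ (PySem.List.pyGetD items (ikv.1 - 1) ("", 0)).2
                      then ikv.1 + 1 else st.2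
          (st.1.insert ikv.2.1 rank, rank))
        (PySem.Dict.empty, 1)).1).items

-- ===== PORT B =====
def dense_rank_alt (mapping : List (String × Int)) (reverse : Bool) : List (String × Int) :=
  if mapping = [] then []
  else
    let groups : PySem.Dict Int (List String) :=
      mapping.foldl (fun g kv => g.modify kv.2 [] (fun ks => ks ++ [kv.1])) PySem.Dict.empty
    (((PySem.List.sorted groups.keys (fun v => v) reverse).foldl
        (fun (st : PySem.Dict String Int × Int) v =>
          let grp := groups.getD v []
          (grp.foldl (fun r k => r.insert k (st.2 + 1)) st.1, st.2 + grp.length))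
        (PySem.Dict.empty, 0)).1).items

-- ===== PRECONDITION & SPEC =====
def Spec_dense_rank (mapping : List (String × Int)) (reverse : Bool) (out : List (String × Int)) : Prop := out = dense_rank_alt mapping reverse
instance (mapping : List (String × Int)) (reverse : Bool) (out : List (String × Int)) : Decidable (Spec_dense_rank mapping reverse out) := by unfold Spec_dense_rank; infer_instance

-- ===== CLAIM (what is proved, stated in full; the proofs are below) =====
def Claim_equal_dense_rank : Prop := ∀ (mapping : List (String × Int)) (reverse : Bool), Dom_dense_rank mapping reverse → Spec_dense_rank mapping reverse (dense_rank mapping reverse)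

-- ===== LEMMAS AND PROOFS =====

-- the strict comparison Python's sorted(key=..., reverse=rev) inserts by
def pvBlt (reverse : Bool) : Int → Int → Bool :=
  fun a b => if reverse then decide (b < a) else decide (a < b)

-- the block of entries of l carrying value v, in original order
def pvBlock (l : List (String × Int)) (v : Int) : List (String × Int) :=
  l.filter (fun q => q.2 == v)

-- canonical result: blocks in value order, the block starting at position j ranked j+1
def pvAnnot (Bf : Int → List (String × Int)) : List Int → Int → List (String × Int)
  | [], _ => []
  | v :: vs, j => (Bf v).map (fun q => (q.1, j + 1)) ++ pvAnnot Bf vs (j + (Bf v).length)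

theorem pvBlt_irrefl (rev : Bool) (a : Int) : pvBlt rev a a = false := by
  cases rev <;> simp [pvBlt]

theorem pvBlt_trans (rev : Bool) {a b c : Int} (h1 : pvBlt rev a b = true) (h2 : pvBlt rev b c = true) : pvBlt rev a c = true := by
  cases rev <;> simp_all [pvBlt] <;> omega

theorem pvBlt_lin (rev : Bool) {a b : Int} (h1 : pvBlt rev a b = false) (h2 : pvBlt rev b a = false) : a = b := by
  cases rev <;> simp_all [pvBlt] <;> omega

theorem insertBy_skip {α : Type} (before : α → α → Bool) (x : α) :
    ∀ (b rest : List α), (∀ y ∈ b, before x y = false) →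
      PySem.List.insertBy before x (b ++ rest) = b ++ PySem.List.insertBy before x rest := by
  intro b
  induction b with
  | nil => simp
  | cons y b ih =>
    intro rest h
    have hy : before x y = false := h y (by simp)
    simp [PySem.List.insertBy, hy, ih rest (fun z hz => h z (by simp [hz]))]

theorem insert_flatMap (rev : Bool) (p : String × Int) :
    ∀ (vs : List Int) (Bf : Int → List (String × Int)),
      vs.Pairwise (fun a b => pvBlt rev a b = true) →
      (∀ v ∈ vs, ∀ q ∈ Bf v, q.2 = v) →
      (∀ v ∈ vs, Bf v ≠ []) →
      PySem.List.insertBy (fun a b => pvBlt rev a.2 b.2) p (vs.flatMap Bf) =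
        if p.2 ∈ vs then vs.flatMap (fun v => Bf v ++ if v == p.2 then [p] else [])
        else (PySem.List.insertBy (pvBlt rev) p.2 vs).flatMap (fun v => if v == p.2 then [p] else Bf v) := by
  intro vs
  induction vs with
  | nil =>
    intro Bf _ _ _
    simp [PySem.List.insertBy]
  | cons v vs ih =>
    intro Bf hpw hpure hne
    have hpw' := (List.pairwise_cons.mp hpw).2
    have hvall := (List.pairwise_cons.mp hpw).1
    have hbv : Bf v ≠ [] := hne v (by simp)
    have hbvpure : ∀ q ∈ Bf v, q.2 = v := hpure v (by simp)
    obtain ⟨e, es, he⟩ : ∃ e es, Bf v = e :: es := by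
      cases hq : Bf v with
      | nil => exact absurd hq hbv
      | cons e es => exact ⟨e, es, rfl⟩
    have hev : e.2 = v := hbvpure e (by simp [he])
    cases hb : pvBlt rev p.2 v with
    | true =>
      -- p goes in front of the whole concatenation; p.2 not in v :: vs
      have hnotin : p.2 ∉ v :: vs := by
        intro hmem
        rcases List.mem_cons.mp hmem with h | h
        · subst h; simp [pvBlt_irrefl] at hb
        · have : pvBlt rev p.2 p.2 = true := pvBlt_trans rev hb (hvall _ h)
          simp [pvBlt_irrefl] at this
      have hbe : pvBlt rev p.2 e.2 = true := by rw [hev]; exact hb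
      rw [if_neg hnotin]
      have hcong : (v :: vs).flatMap (fun w => if w == p.2 then [p] else Bf w) = (v :: vs).flatMap Bf := by
        apply List.flatMap_congr
        intro w hw
        have : w ≠ p.2 := fun hh => hnotin (hh ▸ hw)
        simp [this]
      rw [show PySem.List.insertBy (pvBlt rev) p.2 (v :: vs) = p.2 :: v :: vs by simp [PySem.List.insertBy, hb]]
      rw [List.flatMap_cons (x := p.2), if_pos (by simp), hcong]
      rw [List.flatMap_cons, he]
      simp [PySem.List.insertBy, hbe]
    | false =>
      cases hb2 : pvBlt rev v p.2 with
      | true =>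
        -- p strictly after the v-block
        have hpne : p.2 ≠ v := by
          intro hh; rw [hh] at hb2; simp [pvBlt_irrefl] at hb2
        have hskip : ∀ y ∈ Bf v, (fun (a b : String × Int) => pvBlt rev a.2 b.2) p y = false := by
          intro y hy; show pvBlt rev p.2 y.2 = false; rw [hbvpure y hy]; exact hb
        rw [List.flatMap_cons, insertBy_skip _ _ _ _ hskip, ih Bf hpw' (fun w hw => hpure w (by simp [hw])) (fun w hw => hne w (by simp [hw]))]
        by_cases hm : p.2 ∈ vs
        · rw [if_pos hm, if_pos (by simp [hm]), List.flatMap_cons]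
          rw [show (if v == p.2 then [p] else []) = ([] : List (String × Int)) by simp [Ne.symm hpne]]
          simp
        · rw [if_neg hm, if_neg (by simp only [List.mem_cons]; rintro (hh | hh); exacts [hpne hh, hm hh])]
          rw [show PySem.List.insertBy (pvBlt rev) p.2 (v :: vs) = v :: PySem.List.insertBy (pvBlt rev) p.2 vs by simp [PySem.List.insertBy, hb]]
          rw [List.flatMap_cons]
          rw [show (if v == p.2 then [p] else Bf v) = Bf v by simp [Ne.symm hpne]]
      | false =>
        -- same value: p appended at the end of the v-block
        have hv : v = p.2 := pvBlt_lin rev hb2 hb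
        have hskip : ∀ y ∈ Bf v, (fun (a b : String × Int) => pvBlt rev a.2 b.2) p y = false := by
          intro y hy; show pvBlt rev p.2 y.2 = false; rw [hbvpure y hy]; exact hb
        have hfront : PySem.List.insertBy (fun a b => pvBlt rev a.2 b.2) p (vs.flatMap Bf)
            = p :: vs.flatMap Bf := by
          cases hvs : vs with
          | nil => simp [PySem.List.insertBy]
          | cons w vs' =>
            have hbw : Bf w ≠ [] := hne w (by simp [hvs])
            obtain ⟨e', es', he'⟩ : ∃ e' es', Bf w = e' :: es' := by
              cases hq : Bf w with
              | nil => exact absurd hq hbw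
              | cons e' es' => exact ⟨e', es', rfl⟩
            have hev' : e'.2 = w := hpure w (by simp [hvs]) e' (by simp [he'])
            have hbe' : pvBlt rev p.2 e'.2 = true := by
              rw [hev', ← hv]; exact hvall w (by simp [hvs])
            simp [he', PySem.List.insertBy, hbe']
        rw [List.flatMap_cons, insertBy_skip _ _ _ _ hskip, hfront]
        rw [if_pos (by simp [hv]), List.flatMap_cons, if_pos (by simp [hv])]
        have hcong : vs.flatMap (fun w => Bf w ++ if w == p.2 then [p] else []) = vs.flatMap Bf := by
          apply List.flatMap_congr
          intro w hw
          have : w ≠ p.2 := by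
            intro hh
            have h2 := hvall w hw
            rw [hh, ← hv] at h2
            simp [pvBlt_irrefl] at h2
          simp [this]
        rw [hcong]
        simp

theorem sorted_as_foldl (rev : Bool) (l : List (String × Int)) :
    PySem.List.sorted l (fun x => x.2) rev
      = l.foldl (fun acc x => PySem.List.insertBy (fun a b => pvBlt rev a.2 b.2) x acc) [] := by
  cases rev
  · rw [PySem.List.sorted_eq_foldl_insertBy]
    have : (fun (a b : String × Int) => pvBlt false a.2 b.2) = fun a b => decide (a.2 < b.2) := by
      funext a b; simp [pvBlt]
    rw [this]
  · rw [PySem.List.sorted_rev_eq_foldl_insertBy]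
    have : (fun (a b : String × Int) => pvBlt true a.2 b.2) = fun a b => decide (b.2 < a.2) := by
      funext a b; simp [pvBlt]
    rw [this]

theorem sortedInt_as_foldl (rev : Bool) (xs : List Int) :
    PySem.List.sorted xs (fun v => v) rev
      = xs.foldl (fun acc x => PySem.List.insertBy (pvBlt rev) x acc) [] := by
  cases rev
  · rw [PySem.List.sorted_eq_foldl_insertBy]
    have : pvBlt false = fun (a b : Int) => decide (a < b) := by
      funext a b; simp [pvBlt]
    rw [this]
  · rw [PySem.List.sorted_rev_eq_foldl_insertBy]
    have : pvBlt true = fun (a b : Int) => decide (b < a) := by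
      funext a b; simp [pvBlt]
    rw [this]

theorem svals_pairwise (rev : Bool) (xs : List Int) :
    (PySem.List.sorted (PySem.Set.ofList xs) (fun v => v) rev).Pairwise (fun a b => pvBlt rev a b = true) := by
  have hnd : (PySem.List.sorted (PySem.Set.ofList xs) (fun v => v) rev).Nodup :=
    (PySem.List.sorted_perm _ _ _).symm.nodup (PySem.Set.nodup_ofList xs)
  cases rev
  · have hle := PySem.List.sorted_pairwise (PySem.Set.ofList xs) (fun v => v)
    exact (hle.and hnd).imp (fun {a b} h => by simp [pvBlt]; omega)
  · have hle := PySem.List.sorted_pairwise_rev (PySem.Set.ofList xs) (fun v => v)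
    exact (hle.and hnd).imp (fun {a b} h => by simp [pvBlt]; omega)

theorem ofList_append_singleton (xs : List Int) (x : Int) :
    PySem.Set.ofList (xs ++ [x]) = PySem.Set.add (PySem.Set.ofList xs) x := by
  rw [PySem.Set.ofList_eq_foldl, PySem.Set.ofList_eq_foldl, List.foldl_append]
  rfl

theorem pvBlock_pure (l : List (String × Int)) (v : Int) : ∀ q ∈ pvBlock l v, q.2 = v := by
  intro q hq
  have := List.of_mem_filter hq
  simpa using this

theorem pvBlock_ne_nil (l : List (String × Int)) (v : Int) (h : v ∈ l.map (fun q => q.2)) :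
    pvBlock l v ≠ [] := by
  obtain ⟨q, hq, hv⟩ := List.mem_map.mp h
  exact List.ne_nil_of_mem (List.mem_filter.mpr ⟨hq, by simp [hv]⟩)

theorem pvBlock_append_singleton (l : List (String × Int)) (p : String × Int) (v : Int) :
    pvBlock (l ++ [p]) v = pvBlock l v ++ if p.2 = v then [p] else [] := by
  by_cases h : p.2 = v <;> simp [pvBlock, List.filter_append, h]

theorem sorted_eq_flatMap (rev : Bool) (l : List (String × Int)) :
    PySem.List.sorted l (fun x => x.2) rev =
      (PySem.List.sorted (PySem.Set.ofList (l.map (fun q => q.2))) (fun v => v) rev).flatMap (pvBlock l) := by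
  induction l using List.reverseRecOn with
  | nil => simp [PySem.List.sorted, PySem.Set.ofList, PySem.Set.empty]
  | append_singleton l p ih =>
    rw [sorted_as_foldl, List.foldl_append, List.foldl_cons, List.foldl_nil, ← sorted_as_foldl, ih]
    have hpw := svals_pairwise rev (l.map (fun q => q.2))
    have hpure : ∀ v ∈ PySem.List.sorted (PySem.Set.ofList (l.map (fun q => q.2))) (fun v => v) rev,
        ∀ q ∈ pvBlock l v, q.2 = v := fun v _ => pvBlock_pure l v
    have hmemvals : ∀ v, v ∈ PySem.List.sorted (PySem.Set.ofList (l.map (fun q => q.2))) (fun v => v) rev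
        ↔ v ∈ l.map (fun q => q.2) := by
      intro v
      rw [PySem.List.mem_sorted, PySem.Set.mem_ofList]
    have hne : ∀ v ∈ PySem.List.sorted (PySem.Set.ofList (l.map (fun q => q.2))) (fun v => v) rev,
        pvBlock l v ≠ [] := fun v hv => pvBlock_ne_nil l v ((hmemvals v).mp hv)
    rw [insert_flatMap rev p _ _ hpw hpure hne]
    by_cases hm : p.2 ∈ PySem.List.sorted (PySem.Set.ofList (l.map (fun q => q.2))) (fun v => v) rev
    · -- value already present: distinct values unchanged, p joins its block
      have hsv : PySem.List.sorted (PySem.Set.ofList ((l ++ [p]).map (fun q => q.2))) (fun v => v) rev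
          = PySem.List.sorted (PySem.Set.ofList (l.map (fun q => q.2))) (fun v => v) rev := by
        have : PySem.Set.ofList ((l ++ [p]).map (fun q => q.2)) = PySem.Set.ofList (l.map (fun q => q.2)) := by
          rw [List.map_append, List.map_cons, List.map_nil, ofList_append_singleton, PySem.Set.add,
            if_pos ((PySem.Set.contains_iff _ _).mpr ((PySem.Set.mem_ofList _ _).mpr ((hmemvals p.2).mp hm)))]
        rw [this]
      rw [if_pos hm, hsv]
      apply List.flatMap_congr
      intro v hv
      rw [pvBlock_append_singleton]
      by_cases hvp : v = p.2
      · simp [hvp]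
      · simp [hvp, Ne.symm hvp]
    · -- fresh value: it is inserted among the distinct values with block [p]
      have hnotin : p.2 ∉ l.map (fun q => q.2) := fun hh => hm ((hmemvals p.2).mpr hh)
      have hsv : PySem.List.sorted (PySem.Set.ofList ((l ++ [p]).map (fun q => q.2))) (fun v => v) rev
          = PySem.List.insertBy (pvBlt rev) p.2
              (PySem.List.sorted (PySem.Set.ofList (l.map (fun q => q.2))) (fun v => v) rev) := by
        have h1 : PySem.Set.ofList ((l ++ [p]).map (fun q => q.2))
            = PySem.Set.ofList (l.map (fun q => q.2)) ++ [p.2] := by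
          rw [List.map_append, List.map_cons, List.map_nil, ofList_append_singleton, PySem.Set.add,
            if_neg (fun hh => hm ((hmemvals p.2).mpr ((PySem.Set.mem_ofList _ _).mp ((PySem.Set.contains_iff _ _).mp hh))))]
        rw [h1, sortedInt_as_foldl, List.foldl_append, List.foldl_cons, List.foldl_nil, ← sortedInt_as_foldl]
      rw [if_neg hm, hsv]
      apply List.flatMap_congr
      intro v hv
      rcases (PySem.List.mem_insertBy _ _ _ _).mp hv with hvp | hvs
      · subst hvp
        have hblk : pvBlock l p.2 = [] := by
          rw [pvBlock, List.filter_eq_nil_iff]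
          intro q hq
          simp only [beq_iff_eq]
          exact fun hh => hnotin (List.mem_map.mpr ⟨q, hq, hh⟩)
        rw [pvBlock_append_singleton, hblk, if_pos rfl, if_pos (by simp)]
        rfl
      · have hvp : v ≠ p.2 := by
          intro hh; subst hh; exact hm hvs
        rw [pvBlock_append_singleton, if_neg (fun hh => hvp (Eq.symm hh)), if_neg (by simp [hvp])]
        simp

theorem enumerate_append {α : Type} (xs ys : List α) (s : Int) :
    PySem.List.enumerate (xs ++ ys) s = PySem.List.enumerate xs s ++ PySem.List.enumerate ys (s + xs.length) := by
  induction xs generalizing s with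
  | nil => simp [PySem.List.enumerate]
  | cons x xs ih => simp [PySem.List.enumerate_cons, ih, add_assoc]; ring_nf

theorem A_block_tail (items suf : List (String × Int)) (dflt : String × Int) (v : Int) :
    ∀ (b : List (String × Int)) (j : Nat) (d : PySem.Dict String Int) (r : Int) (prev : String × Int),
      (∀ q ∈ b, q.2 = v) → items.drop j = b ++ suf → 1 ≤ j →
      items[j-1]? = some prev → prev.2 = v →
      (PySem.List.enumerate b j).foldl
        (fun (st : PySem.Dict String Int × Int) ikv =>
          let rank := if ikv.1 > 0 ∧ ikv.2.2 ≠ (PySem.List.pyGetD items (ikv.1 - 1) dflt).2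
                      then ikv.1 + 1 else st.2
          (st.1.insert ikv.2.1 rank, rank)) (d, r)
      = (b.foldl (fun d q => d.insert q.1 r) d, r) := by
  intro b
  induction b with
  | nil => intro j d r prev _ _ _ _ _; rfl
  | cons q b ih =>
    intro j d r prev hpure hdrop hj hgetPrev hprevv
    have hqv : q.2 = v := hpure q (by simp)
    -- the look-back value items[j-1] is prev
    have hcast : ((j : Int) - 1) = ((j - 1 : Nat) : Int) := by omega
    have hget : PySem.List.pyGetD items ((j : Int) - 1) dflt = prev := by
      rw [hcast, PySem.List.pyGetD_natCast]
      simp [List.getD, hgetPrev]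
    have hcond : ¬ ((j : Int) > 0 ∧ q.2 ≠ (PySem.List.pyGetD items ((j : Int) - 1) dflt).2) := by
      rw [hget]; simp [hqv, hprevv]
    rw [PySem.List.enumerate_cons, List.foldl_cons]
    simp only [hcond, if_false]
    have hq : items[j]? = some q := by
      have : (items.drop j)[0]? = some q := by rw [hdrop]; rfl
      simpa using this
    have hdrop' : items.drop (j + 1) = b ++ suf := by
      rw [← List.tail_drop, hdrop]; rfl
    have := ih (j + 1) (d.insert q.1 r) r q (fun z hz => hpure z (by simp [hz])) hdrop'
      (by omega) (by simpa using hq) hqv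
    rw [List.foldl_cons, show ((j : Int) + 1) = ((j + 1 : Nat) : Int) by omega]
    exact this

theorem A_block (items suf : List (String × Int)) (dflt : String × Int) (v : Int)
    (b : List (String × Int)) (j : Nat) (d : PySem.Dict String Int) (r : Int)
    (hb : b ≠ []) (hpure : ∀ q ∈ b, q.2 = v) (hdrop : items.drop j = b ++ suf)
    (hstart : (j = 0 ∧ r = 1) ∨ (1 ≤ j ∧ ∃ prev, items[j-1]? = some prev ∧ prev.2 ≠ v)) :
    (PySem.List.enumerate b j).foldl
        (fun (st : PySem.Dict String Int × Int) ikv =>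
          let rank := if ikv.1 > 0 ∧ ikv.2.2 ≠ (PySem.List.pyGetD items (ikv.1 - 1) dflt).2
                      then ikv.1 + 1 else st.2
          (st.1.insert ikv.2.1 rank, rank)) (d, r)
      = (b.foldl (fun d q => d.insert q.1 ((j : Int) + 1)) d, (j : Int) + 1) := by
  obtain ⟨q, b', rfl⟩ : ∃ q b', b = q :: b' := by
    cases b with
    | nil => exact absurd rfl hb
    | cons q b' => exact ⟨q, b', rfl⟩
  have hqv : q.2 = v := hpure q (by simp)
  have hrank : (if (j : Int) > 0 ∧ q.2 ≠ (PySem.List.pyGetD items ((j : Int) - 1) dflt).2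
      then (j : Int) + 1 else r) = (j : Int) + 1 := by
    rcases hstart with ⟨hj0, hr1⟩ | ⟨hj1, prev, hgp, hpv⟩
    · subst hj0; subst hr1; simp
    · have hcast : ((j : Int) - 1) = ((j - 1 : Nat) : Int) := by omega
      have hget : PySem.List.pyGetD items ((j : Int) - 1) dflt = prev := by
        rw [hcast, PySem.List.pyGetD_natCast]
        simp [List.getD, hgp]
      rw [hget, if_pos ⟨by exact_mod_cast Nat.pos_of_ne_zero (by omega), by rw [hqv]; exact fun hh => hpv hh.symm⟩]
  have hq : items[j]? = some q := by
    have : (items.drop j)[0]? = some q := by rw [hdrop]; rfl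
    simpa using this
  have hdrop' : items.drop (j + 1) = b' ++ suf := by
    rw [← List.tail_drop, hdrop]; rfl
  rw [PySem.List.enumerate_cons, List.foldl_cons, List.foldl_cons]
  simp only [hrank]
  have := A_block_tail items suf dflt v b' (j + 1) (d.insert q.1 ((j : Int) + 1)) ((j : Int) + 1) q
    (fun z hz => hpure z (by simp [hz])) hdrop' (by omega) (by simpa using hq) hqv
  rw [show ((j : Int) + 1) = ((j + 1 : Nat) : Int) by omega]
  exact this

theorem A_blocks (items : List (String × Int)) (dflt : String × Int) (Bf : Int → List (String × Int)) :
    ∀ (vs : List Int) (j : Nat) (d : PySem.Dict String Int) (r : Int),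
      items.drop j = vs.flatMap Bf →
      (∀ v ∈ vs, ∀ q ∈ Bf v, q.2 = v) →
      (∀ v ∈ vs, Bf v ≠ []) →
      vs.Nodup →
      ((j = 0 ∧ r = 1) ∨ (1 ≤ j ∧ ∃ prev, items[j-1]? = some prev ∧ prev.2 ∉ vs)) →
      ∃ r', (PySem.List.enumerate (vs.flatMap Bf) j).foldl
        (fun (st : PySem.Dict String Int × Int) ikv =>
          let rank := if ikv.1 > 0 ∧ ikv.2.2 ≠ (PySem.List.pyGetD items (ikv.1 - 1) dflt).2
                      then ikv.1 + 1 else st.2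
          (st.1.insert ikv.2.1 rank, rank)) (d, r)
      = ((pvAnnot Bf vs j).foldl (fun d q => d.insert q.1 q.2) d, r') := by
  intro vs
  induction vs with
  | nil => intro j d r _ _ _ _ _; exact ⟨r, rfl⟩
  | cons v vs ih =>
    intro j d r hdrop hpure hne hnd hstart
    have hbne : Bf v ≠ [] := hne v (by simp)
    have hlenpos : 0 < (Bf v).length := List.length_pos_iff.mpr hbne
    have hdropb : items.drop j = Bf v ++ vs.flatMap Bf := by simpa using hdrop
    have hblock := A_block items (vs.flatMap Bf) dflt v (Bf v) j d r hbne
      (fun q hq => hpure v (by simp) q hq) hdropb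
      (by rcases hstart with h | ⟨h1, prev, hp, hm⟩
          · exact Or.inl h
          · exact Or.inr ⟨h1, prev, hp, fun he => hm (by simp [he])⟩)
    -- the element just before position j + |Bf v| is the last element of Bf v
    have hlast : ∃ last, items[j + (Bf v).length - 1]? = some last ∧ last.2 = v := by
      refine ⟨(Bf v).getLast hbne, ?_, hpure v (by simp) _ (List.getLast_mem hbne)⟩
      have h1 : items[j + ((Bf v).length - 1)]? = (items.drop j)[(Bf v).length - 1]? := by
        rw [List.getElem?_drop]
      rw [show j + (Bf v).length - 1 = j + ((Bf v).length - 1) by omega, h1, hdropb,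
        List.getElem?_append_left (by omega), List.getLast?_eq_getElem?.symm,
        List.getLast?_eq_some_getLast hbne]
    obtain ⟨last, hlget, hlv⟩ := hlast
    obtain ⟨r', hr'⟩ := ih (j + (Bf v).length)
      ((Bf v).foldl (fun d q => d.insert q.1 ((j : Int) + 1)) d) ((j : Int) + 1)
      (by rw [← List.drop_drop, hdropb, List.drop_left])
      (fun w hw => hpure w (by simp [hw]))
      (fun w hw => hne w (by simp [hw]))
      hnd.of_cons
      (Or.inr ⟨by omega, last, hlget, by
        rw [hlv]; exact (List.nodup_cons.mp hnd).1⟩)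
    refine ⟨r', ?_⟩
    rw [List.flatMap_cons, enumerate_append, List.foldl_append, hblock]
    rw [show ((j : Nat) : Int) + ((Bf v).length : Int) = ((j + (Bf v).length : Nat) : Int) by push_cast; ring]
    rw [hr']
    show _ = ((pvAnnot Bf (v :: vs) j).foldl (fun d q => d.insert q.1 q.2) d, r')
    rw [pvAnnot, List.foldl_append, List.foldl_map]
    rw [show ((j : Int) + ((Bf v).length : Int)) = ((j + (Bf v).length : Nat) : Int) by push_cast; ring]

theorem dict_contains_iff_mem_keys {ν : Type} (d : PySem.Dict Int ν) (k : Int) :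
    d.contains k = true ↔ k ∈ d.keys := by
  simp [PySem.Dict.contains, PySem.Dict.keys, List.any_eq_true, List.mem_map]

theorem keys_insert_eq_add {ν : Type} (d : PySem.Dict Int ν) (k : Int) (v : ν) :
    (d.insert k v).keys = PySem.Set.add d.keys k := by
  by_cases h : d.contains k = true
  · have hm : k ∈ d.keys := (dict_contains_iff_mem_keys d k).mp h
    have hkc : PySem.Set.contains d.keys k = true := (PySem.Set.contains_iff _ _).mpr hm
    simp only [PySem.Set.add, hkc, if_true]
    simp only [PySem.Dict.insert, h, if_true, PySem.Dict.keys, List.map_map]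
    apply List.map_congr_left
    intro p hp
    by_cases hpk : (p.1 == k) = true
    · simp [Function.comp, hpk]; exact (LawfulBEq.eq_of_beq hpk).symm
    · simp [Function.comp, hpk]
  · have hm : ¬ k ∈ d.keys := fun hh => h ((dict_contains_iff_mem_keys d k).mpr hh)
    have hkc : PySem.Set.contains d.keys k = false :=
      by cases hh : PySem.Set.contains d.keys k
         · rfl
         · exact absurd ((PySem.Set.contains_iff _ _).mp hh) hm
    simp only [PySem.Set.add, hkc, Bool.false_eq_true, if_false]
    simp [PySem.Dict.insert, h, PySem.Dict.keys]

theorem B_groups_keys_gen (l : List (String × Int)) :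
    ∀ (g : PySem.Dict Int (List String)),
    (l.foldl (fun (g : PySem.Dict Int (List String)) kv => g.modify kv.2 [] (fun ks => ks ++ [kv.1])) g).keys
      = l.foldl (fun ks q => PySem.Set.add ks q.2) g.keys := by
  induction l with
  | nil => intro g; rfl
  | cons p l ih =>
    intro g
    rw [List.foldl_cons, List.foldl_cons, ih, PySem.Dict.modify, keys_insert_eq_add]

theorem B_groups_keys (l : List (String × Int)) :
    (l.foldl (fun (g : PySem.Dict Int (List String)) kv => g.modify kv.2 [] (fun ks => ks ++ [kv.1])) PySem.Dict.empty).keys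
      = PySem.Set.ofList (l.map (fun q => q.2)) := by
  rw [B_groups_keys_gen, PySem.Set.ofList_eq_foldl, List.foldl_map]
  rfl

theorem B_groups_getD (l : List (String × Int)) (v : Int) :
    (l.foldl (fun (g : PySem.Dict Int (List String)) kv => g.modify kv.2 [] (fun ks => ks ++ [kv.1])) PySem.Dict.empty).getD v []
      = (l.filter (fun q => q.2 == v)).map (fun q => q.1) := by
  have gen : ∀ (l : List (String × Int)) (g : PySem.Dict Int (List String)),
      (l.foldl (fun (g : PySem.Dict Int (List String)) kv => g.modify kv.2 [] (fun ks => ks ++ [kv.1])) g).getD v []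
        = g.getD v [] ++ (l.filter (fun q => q.2 == v)).map (fun q => q.1) := by
    intro l
    induction l with
    | nil => intro g; simp
    | cons p l ih =>
      intro g
      by_cases h : p.2 = v
      · subst h
        simp [List.foldl_cons, ih, PySem.Dict.getD_modify_self]
      · simp [List.foldl_cons, ih, PySem.Dict.getD_modify_of_ne _ _ _ (Ne.symm h), h]
  rw [gen]
  rfl

theorem B_loop (groups : PySem.Dict Int (List String)) (Bf : Int → List (String × Int)) :
    ∀ (vs : List Int) (d : PySem.Dict String Int) (t : Int),
      (∀ v ∈ vs, groups.getD v [] = (Bf v).map (fun q => q.1)) →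
      ∃ t', vs.foldl
        (fun (st : PySem.Dict String Int × Int) v =>
          let grp := groups.getD v []
          (grp.foldl (fun r k => r.insert k (st.2 + 1)) st.1, st.2 + grp.length)) (d, t)
      = ((pvAnnot Bf vs t).foldl (fun d q => d.insert q.1 q.2) d, t') := by
  intro vs
  induction vs with
  | nil => intro d t h; exact ⟨t, rfl⟩
  | cons v vs ih =>
    intro d t h
    have hv := h v (by simp)
    obtain ⟨t', ht'⟩ := ih ((Bf v).foldl (fun r q => r.insert q.1 (t + 1)) d) (t + (Bf v).length)
      (fun w hw => h w (by simp [hw]))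
    refine ⟨t', ?_⟩
    rw [List.foldl_cons]
    simp only [hv, List.length_map, List.foldl_map]
    rw [ht', pvAnnot, List.foldl_append, List.foldl_map]


-- ===== VERDICT (by name: the statement is the Claim_ definition above) =====
theorem dense_rank_spec : Claim_equal_dense_rank := by
  intro mapping reverse _
  unfold Spec_dense_rank
  by_cases hnil : mapping = []
  · simp [dense_rank, dense_rank_alt, hnil]
  · simp only [dense_rank, dense_rank_alt, if_neg hnil]
    rw [sorted_eq_flatMap reverse mapping, B_groups_keys]
    have hmemvals : ∀ v, v ∈ PySem.List.sorted (PySem.Set.ofList (mapping.map (fun q => q.2))) (fun v => v) reverse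
        ↔ v ∈ mapping.map (fun q => q.2) := by
      intro v
      rw [PySem.List.mem_sorted, PySem.Set.mem_ofList]
    have hnd : (PySem.List.sorted (PySem.Set.ofList (mapping.map (fun q => q.2))) (fun v => v) reverse).Nodup :=
      (PySem.List.sorted_perm _ _ _).symm.nodup (PySem.Set.nodup_ofList _)
    obtain ⟨r', hA⟩ := A_blocks
      ((PySem.List.sorted (PySem.Set.ofList (mapping.map (fun q => q.2))) (fun v => v) reverse).flatMap (pvBlock mapping))
      ("", 0) (pvBlock mapping)
      (PySem.List.sorted (PySem.Set.ofList (mapping.map (fun q => q.2))) (fun v => v) reverse)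
      0 PySem.Dict.empty 1
      (by rw [List.drop_zero])
      (fun v _ => pvBlock_pure mapping v)
      (fun v hv => pvBlock_ne_nil mapping v ((hmemvals v).mp hv))
      hnd
      (Or.inl ⟨rfl, rfl⟩)
    obtain ⟨t', hB⟩ := B_loop
      (mapping.foldl (fun (g : PySem.Dict Int (List String)) kv => g.modify kv.2 [] (fun ks => ks ++ [kv.1])) PySem.Dict.empty)
      (pvBlock mapping)
      (PySem.List.sorted (PySem.Set.ofList (mapping.map (fun q => q.2))) (fun v => v) reverse)
      PySem.Dict.empty 0
      (fun v _ => B_groups_getD mapping v)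
    rw [show ((0 : Int)) = ((0 : Nat) : Int) by norm_num] at *
    rw [hA, hB]
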